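-- pv_equiv track=rewrite | github.com/kumarAnand05/LeetCode-Solutions | 2457. Minimum Addition to Make Integer Beautiful.py | makeIntegerBeautiful
-- ===== SOURCE A (Python) =====
-- def makeIntegerBeautiful(n: int, target: int) -> int:
--     digits= list(map(int,list(str(n))))
--     if sum(digits)<=target:return 0
--     elif digits[0]>=target: return int('1'+str(0)*len(digits))-n
--     else:
--         it=0
--         place=0
--         for n in digits:
--             check= it+n
--             if check>=target:
--                 break
--             else:
--                 it+=n
--                 place+=1
--         band=int('1'+str(0)*(len(digits)-place))
--         ded=''.join(list(map(str,digits[place:])))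
--         return band-int(ded)
-- ===== SOURCE B (Python) =====
-- def _digit_sum(m):
--     s = 0
--     while m > 0:
--         s += m % 10
--         m //= 10
--     return s
--
--
-- def makeIntegerBeautiful(n: int, target: int) -> int:
--     if n < 0:
--         raise ValueError("digit sum is undefined for negative integers")
--     p = 1
--     while _digit_sum((n + p - 1) // p * p) > target and p <= n:
--         p *= 10
--     return (n + p - 1) // p * p - n
-- ===== Notes on version B (the rewrite author's own statement) =====
-- stated objective: alternative
-- what changed: A converts n to a string and makes one accumulating prefix-digit-sum pass to pick the rounding position; B is the canonical arithmetic greedy: pure %10/Euclidean-div digit sums and, for p = 1, 10, 100, ..., returns the first candidate (n rounded up to a multiple of p) whose digit sum is within target, never touching strings.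
-- intended difference: For n = 0 with target < 0 (an unsatisfiable target) A returns 10, an artefact of its leading-digit branch, while B returns 0, the natural minimal addition. — e.g. on makeIntegerBeautiful(0, -1): A returns 10, B returns 0
import Mathlib
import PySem

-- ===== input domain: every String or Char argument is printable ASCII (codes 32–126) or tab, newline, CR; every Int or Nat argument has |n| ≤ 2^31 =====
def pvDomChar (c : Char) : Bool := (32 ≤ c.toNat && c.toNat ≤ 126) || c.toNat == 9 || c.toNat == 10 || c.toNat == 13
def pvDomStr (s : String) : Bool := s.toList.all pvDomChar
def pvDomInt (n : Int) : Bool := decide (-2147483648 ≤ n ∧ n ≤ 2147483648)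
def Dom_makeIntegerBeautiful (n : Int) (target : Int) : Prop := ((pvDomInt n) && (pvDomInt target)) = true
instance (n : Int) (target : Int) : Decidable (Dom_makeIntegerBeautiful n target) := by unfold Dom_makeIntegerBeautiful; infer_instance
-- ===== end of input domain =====

-- B replaces A's single prefix-sum scan over the characters of str(n) by the canonical
-- arithmetic greedy over powers of ten (digit sums by %10 loops, candidate = n rounded up
-- to a multiple of 10^k); objective: alternative (no speed claim).

-- ===== PORT A =====

-- int(ch) for a single character ch (list(str(n)) yields 1-character strings)
def pyIntOfChar (c : Char) : Option Int := PySem.Int.ofStr? (String.ofList [c])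

-- int(s) for the pure-ASCII-digit strings THIS code constructs ('1'+'0'*k and a join of
-- single digits); hand-ported as the decimal fold, which is exact on nonempty all-digit
-- strings (the only shapes reaching it), because PySem.Int.ofStr?'s inner digit-fold is private.
def digitStrVal (cs : List Char) : Int := cs.foldl (fun a c => 10 * a + ((c.toNat : Int) - 48)) 0

-- the 'for n in digits' loop with its break: state (it, place)
def loopA (target : Int) : List Int → Int → Int → Int × Int
  | [], it, place => (it, place)
  | d :: ds, it, place =>
      if target ≤ it + d then (it, place)
      else loopA target ds (it + d) (place + 1)

def makeIntegerBeautiful (n : Int) (target : Int) : Int :=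
  match List.mapM pyIntOfChar (PySem.Int.toStr n).toList with
  | none => 0   -- int() raised ValueError (the '-' of a negative n); excluded by Pre_
  | some digits =>
    if digits.sum ≤ target then 0
    else if target ≤ (PySem.List.pyGet? digits 0).getD 0 then   -- digits[0]: never empty, getD unreachable
      digitStrVal ('1' :: List.replicate digits.length '0') - n
    else
      let r := loopA target digits 0 0
      let place := r.2
      let band := digitStrVal ('1' :: List.replicate (((digits.length : Int) - place).toNat) '0')
      let ded := digitStrVal ((PySem.List.slice digits (some place)).flatMap
                   (fun d => (PySem.Int.toStr d).toList))
      band - ded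

-- ===== PORT B =====

-- s accumulates the digit sum exactly as the Python while-loop does
def digitSumB (m : Int) (s : Int) : Int :=
  if h : 0 < m then digitSumB (PySem.Int.floordiv m 10) (s + PySem.Int.mod m 10) else s
  termination_by m.toNat
  decreasing_by
    have h1 : PySem.Int.floordiv m 10 = ((m.toNat / 10 : ℕ) : ℤ) := by
      simp only [PySem.Int.floordiv]
      rw [show m = ((m.toNat : ℕ) : ℤ) from by omega, show (10 : ℤ) = ((10 : ℕ) : ℤ) from rfl,
        ← Int.ofNat_fdiv]
      simp
    rw [h1]; omega

def loopB (n : Int) (target : Int) (p : Int) (hp : 0 < p) : Int :=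
  if target < digitSumB (PySem.Int.floordiv (n + p - 1) p * p) 0 ∧ p ≤ n then
    loopB n target (p * 10) (by positivity)
  else
    PySem.Int.floordiv (n + p - 1) p * p - n
  termination_by (n + 1 - p).toNat
  decreasing_by omega

def makeIntegerBeautiful_alt (n : Int) (target : Int) : Int :=
  if n < 0 then 0   -- raise ValueError; excluded by Pre_
  else loopB n target 1 (by norm_num)

-- ===== PRECONDITION & SPEC =====

-- Pre_ excludes exactly the inputs where A raises: n < 0 makes int('-') raise ValueError
-- (B raises ValueError there too).
def Pre_makeIntegerBeautiful (n : Int) (target : Int) : Prop := 0 ≤ n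
instance (n : Int) (target : Int) : Decidable (Pre_makeIntegerBeautiful n target) := by unfold Pre_makeIntegerBeautiful; infer_instance
def pvWitness_makeIntegerBeautiful : Int × Int := (95, 3)

-- For n = 0 and target < 0 (an unsatisfiable target: no addition can give a digit sum ≤ a
-- negative number) A returns 10, an artefact of its leading-digit branch, while B returns 0,
-- the natural minimal addition.
def D_makeIntegerBeautiful (n : Int) (target : Int) : Prop := n = 0 ∧ target < 0
instance (n : Int) (target : Int) : Decidable (D_makeIntegerBeautiful n target) := by unfold D_makeIntegerBeautiful; infer_instance

def Spec_makeIntegerBeautiful (n : Int) (target : Int) (out : Int) : Prop :=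
  ¬ D_makeIntegerBeautiful n target → out = makeIntegerBeautiful_alt n target
instance (n : Int) (target : Int) (out : Int) : Decidable (Spec_makeIntegerBeautiful n target out) := by unfold Spec_makeIntegerBeautiful; infer_instance

def pvDiffWitness_makeIntegerBeautiful : Int × Int := (0, -1)
def pvDiffWitnessOut_makeIntegerBeautiful : Int × Int := (10, 0)

-- ===== CLAIM (what is proved, stated in full; the proofs are below) =====
def Claim_unchanged_makeIntegerBeautiful : Prop := ∀ (n : Int) (target : Int), Dom_makeIntegerBeautiful n target → Pre_makeIntegerBeautiful n target → Spec_makeIntegerBeautiful n target (makeIntegerBeautiful n target)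
def Claim_changed_makeIntegerBeautiful : Prop := Dom_makeIntegerBeautiful (pvDiffWitness_makeIntegerBeautiful.1) (pvDiffWitness_makeIntegerBeautiful.2) ∧ Pre_makeIntegerBeautiful (pvDiffWitness_makeIntegerBeautiful.1) (pvDiffWitness_makeIntegerBeautiful.2) ∧ D_makeIntegerBeautiful (pvDiffWitness_makeIntegerBeautiful.1) (pvDiffWitness_makeIntegerBeautiful.2) ∧ makeIntegerBeautiful (pvDiffWitness_makeIntegerBeautiful.1) (pvDiffWitness_makeIntegerBeautiful.2) = pvDiffWitnessOut_makeIntegerBeautiful.1 ∧ makeIntegerBeautiful_alt (pvDiffWitness_makeIntegerBeautiful.1) (pvDiffWitness_makeIntegerBeautiful.2) = pvDiffWitnessOut_makeIntegerBeautiful.2 ∧ pvDiffWitnessOut_makeIntegerBeautiful.1 ≠ pvDiffWitnessOut_makeIntegerBeautiful.2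
def Claim_exact_makeIntegerBeautiful : Prop := ∀ (n : Int) (target : Int), Dom_makeIntegerBeautiful n target → Pre_makeIntegerBeautiful n target → D_makeIntegerBeautiful n target → makeIntegerBeautiful n target ≠ makeIntegerBeautiful_alt n target

-- ===== LEMMAS AND PROOFS =====

-- ---- arithmetic digit sum ----
def sN (m : ℕ) : ℕ :=
  if h : m = 0 then 0 else m % 10 + sN (m / 10)
  termination_by m
  decreasing_by exact Nat.div_lt_self (Nat.pos_of_ne_zero h) (by norm_num)

lemma sN_zero : sN 0 = 0 := by rw [sN]; rfl

lemma sN_eq (m : ℕ) : sN m = m % 10 + sN (m / 10) := by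
  rcases eq_or_ne m 0 with h | h
  · simp [h, sN_zero]
  · rw [sN]; simp [h]

lemma sN_digit {d : ℕ} (h : d < 10) : sN d = d := by
  rw [sN_eq, Nat.mod_eq_of_lt h, Nat.div_eq_of_lt h, sN_zero]; omega

lemma sN_mul10_add (q e : ℕ) (he : e < 10) : sN (10 * q + e) = sN q + e := by
  rw [sN_eq]
  have h1 : (10 * q + e) % 10 = e := by omega
  have h2 : (10 * q + e) / 10 = q := by omega
  rw [h1, h2]; omega

lemma sN_pos {m : ℕ} (h : 0 < m) : 0 < sN m := by
  induction m using Nat.strong_induction_on with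
  | _ m ih =>
    rw [sN_eq]
    rcases Nat.eq_zero_or_pos (m / 10) with h0 | h0
    · have : m % 10 ≠ 0 := by omega
      omega
    · have := ih (m / 10) (Nat.div_lt_self h (by norm_num)) h0
      omega

lemma sN_split (k : ℕ) : ∀ a b : ℕ, a < 10 ^ k → sN (a + 10 ^ k * b) = sN a + sN b := by
  induction k with
  | zero => intro a b ha; interval_cases a; simp [sN_zero]
  | succ k ih =>
    intro a b ha
    have hd : a / 10 < 10 ^ k := by
      rw [Nat.div_lt_iff_lt_mul (by norm_num)]
      calc a < 10 ^ (k + 1) := ha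
        _ = 10 ^ k * 10 := by ring
    have e1 : a + 10 ^ (k + 1) * b = 10 * (a / 10 + 10 ^ k * b) + a % 10 := by
      conv_lhs => rw [← Nat.div_add_mod a 10]
      rw [pow_succ]; ring
    have e2 : sN a = sN (a / 10) + a % 10 := by
      conv_lhs => rw [← Nat.div_add_mod a 10]
      rw [sN_mul10_add _ _ (Nat.mod_lt _ (by norm_num))]
    rw [e1, sN_mul10_add _ _ (Nat.mod_lt _ (by norm_num)), ih _ b hd, e2]
    omega

lemma sN_mul_pow (b k : ℕ) : sN (b * 10 ^ k) = sN b := by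
  have := sN_split k 0 b (by positivity)
  simp [sN_zero] at this
  rw [mul_comm]; omega

lemma sN_div10_le (m : ℕ) : sN (m / 10) ≤ sN m := by
  rw [sN_eq m]; omega

lemma sN_div_anti {j k : ℕ} (m : ℕ) (h : j ≤ k) : sN (m / 10 ^ k) ≤ sN (m / 10 ^ j) := by
  induction k with
  | zero => simp_all
  | succ k ih =>
    rcases eq_or_lt_of_le h with h1 | h1
    · rw [h1]
    · have hjk : j ≤ k := by omega
      calc sN (m / 10 ^ (k + 1)) = sN (m / 10 ^ k / 10) := by
            rw [Nat.div_div_eq_div_mul, ← pow_succ]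
        _ ≤ sN (m / 10 ^ k) := sN_div10_le _
        _ ≤ sN (m / 10 ^ j) := ih hjk

lemma sN_succ_le (m : ℕ) : sN (m + 1) ≤ sN m + 1 := by
  induction m using Nat.strong_induction_on with
  | _ m ih =>
    rcases lt_or_ge (m % 10) 9 with h | h
    · have h1 : (m + 1) % 10 = m % 10 + 1 := by omega
      have h2 : (m + 1) / 10 = m / 10 := by omega
      rw [sN_eq (m + 1), h1, h2, sN_eq m]; omega
    · have h9 : m % 10 = 9 := by omega
      have h1 : (m + 1) % 10 = 0 := by omega
      have h2 : (m + 1) / 10 = m / 10 + 1 := by omega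
      have hm : 0 < m := by omega
      have := ih (m / 10) (Nat.div_lt_self hm (by norm_num))
      rw [sN_eq (m + 1), h1, h2, sN_eq m]
      omega

lemma digitsSum_eq (m : ℕ) : (Nat.digits 10 m).sum = sN m := by
  induction m using Nat.strong_induction_on with
  | _ m ih =>
    rcases Nat.eq_zero_or_pos m with h | h
    · simp [h, sN_zero]
    · rw [Nat.digits_def' (by norm_num) h, List.sum_cons,
        ih (m / 10) (Nat.div_lt_self h (by norm_num)), sN_eq m]


lemma sN_min (t : ℤ) (m : ℕ) (hSm : t < (sN m : ℤ)) :
    ∀ k, (∀ j < k, t ≤ (sN (m / 10 ^ j) : ℤ)) →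
      ∀ N : ℕ, m ≤ N → N < (m / 10 ^ k + 1) * 10 ^ k → t < (sN N : ℤ) := by
  intro k
  induction k with
  | zero =>
    intro _ N h1 h2
    simp at h2
    have : N = m := by omega
    rwa [this]
  | succ k ih =>
    intro hj N h1 h2
    rcases lt_or_ge N ((m / 10 ^ k + 1) * 10 ^ k) with hN | hN
    · exact ih (fun j hjk => hj j (by omega)) N h1 hN
    · have hq : m / 10 ^ (k + 1) = m / 10 ^ k / 10 := by
        rw [Nat.div_div_eq_div_mul, ← pow_succ]
      set q := m / 10 ^ k with hqdef
      have hQlow : q + 1 ≤ N / 10 ^ k := by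
        rw [Nat.le_div_iff_mul_le (by positivity)]
        exact hN
      have hQhigh : N / 10 ^ k < (q / 10 + 1) * 10 := by
        rw [Nat.div_lt_iff_lt_mul (by positivity)]
        calc N < (m / 10 ^ (k + 1) + 1) * 10 ^ (k + 1) := h2
          _ = (q / 10 + 1) * 10 * 10 ^ k := by rw [hq]; ring
      set Q := N / 10 ^ k with hQdef
      have hsplitN : sN N = sN (N % 10 ^ k) + sN Q := by
        conv_lhs => rw [← Nat.mod_add_div N (10 ^ k)]
        exact sN_split k _ _ (Nat.mod_lt _ (by positivity))
      have he : Q = 10 * (q / 10) + (Q - 10 * (q / 10)) := by omega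
      have he2 : q % 10 < Q - 10 * (q / 10) := by omega
      have he3 : Q - 10 * (q / 10) < 10 := by omega
      have hSQ : sN Q = sN (q / 10) + (Q - 10 * (q / 10)) := by
        conv_lhs => rw [he]
        exact sN_mul10_add _ _ he3
      have hSq : sN q = sN (q / 10) + q % 10 := by
        conv_lhs => rw [← Nat.div_add_mod q 10]
        exact sN_mul10_add _ _ (Nat.mod_lt _ (by norm_num))
      have hget : t ≤ (sN q : ℤ) := hj k (by omega)
      have : sN q + 1 ≤ sN N := by omega
      omega


lemma toDigitsCore_eq : ∀ (m : ℕ) (f : ℕ) (acc : List Char), 0 < m → m < f →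
    Nat.toDigitsCore 10 f m acc = ((Nat.digits 10 m).map Nat.digitChar).reverse ++ acc := by
  intro m
  induction m using Nat.strong_induction_on with
  | _ m ih =>
    intro f acc hm hf
    match f with
    | f + 1 =>
      rw [Nat.toDigitsCore]
      rcases Nat.eq_zero_or_pos (m / 10) with h0 | h0
      · have hlt : m < 10 := by omega
        simp only [h0, if_pos rfl]
        rw [Nat.digits_def' (by norm_num : (1:ℕ) < 10) hm, Nat.div_eq_of_lt hlt]
        simp [Nat.mod_eq_of_lt hlt]
      · have hne : ¬ m / 10 = 0 := by omega
        simp only [hne, if_neg, ite_false]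
        rw [ih (m / 10) (Nat.div_lt_self hm (by norm_num)) f _ h0 (by omega)]
        rw [Nat.digits_def' (by norm_num : (1:ℕ) < 10) hm]
        simp

lemma toChars_pos (m : ℕ) (hm : 0 < m) :
    PySem.Int.toChars (m : ℤ) = ((Nat.digits 10 m).map Nat.digitChar).reverse := by
  unfold PySem.Int.toChars
  rw [if_neg (by omega)]
  have : ((m : ℤ)).toNat = m := by omega
  rw [this, Nat.toDigits, toDigitsCore_eq m (m + 1) [] hm (by omega)]
  simp

lemma toChars_digit (d : ℕ) (hd : d < 10) :
    PySem.Int.toChars (d : ℤ) = [Nat.digitChar d] := by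
  rcases Nat.eq_zero_or_pos d with h0 | h0
  · subst h0; decide
  · rw [toChars_pos d h0, Nat.digits_def' (by norm_num : (1:ℕ) < 10) h0,
      Nat.div_eq_of_lt hd, Nat.mod_eq_of_lt hd]
    simp

lemma pyIntOfChar_digit (d : ℕ) (hd : d < 10) :
    pyIntOfChar (Nat.digitChar d) = some (d : ℤ) := by
  interval_cases d <;> decide

lemma mapM_digits (l : List ℕ) (hl : ∀ d ∈ l, d < 10) :
    List.mapM pyIntOfChar (l.map Nat.digitChar) = some (l.map (fun d : ℕ => (d : ℤ))) := by
  induction l with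
  | nil => rfl
  | cons d l ih =>
    simp only [List.map_cons, List.mapM_cons, pyIntOfChar_digit d (hl d (by simp)),
      ih (fun x hx => hl x (by simp [hx]))]
    rfl

lemma digitChar_toNat (d : ℕ) (hd : d < 10) : (Nat.digitChar d).toNat = 48 + d := by
  interval_cases d <;> decide

lemma digitStrVal_go (l : List ℕ) (hl : ∀ d ∈ l, d < 10) : ∀ a : ℤ,
    (List.foldl (fun a c => 10 * a + ((c.toNat : Int) - 48)) a (l.map Nat.digitChar)) =
      a * 10 ^ l.length + ((Nat.ofDigits 10 l.reverse : ℕ) : ℤ) := by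
  induction l with
  | nil => intro a; simp
  | cons d l ih =>
    intro a
    simp only [List.map_cons, List.foldl_cons]
    rw [digitChar_toNat d (hl d (by simp)), ih (fun x hx => hl x (by simp [hx]))]
    rw [List.reverse_cons, Nat.ofDigits_append]
    push_cast [Nat.ofDigits_singleton]
    simp [List.length_reverse]
    ring

lemma digitStrVal_digits (l : List ℕ) (hl : ∀ d ∈ l, d < 10) :
    digitStrVal (l.map Nat.digitChar) = ((Nat.ofDigits 10 l.reverse : ℕ) : ℤ) := by
  unfold digitStrVal
  rw [digitStrVal_go l hl 0]
  ring

lemma digitStrVal_band (k : ℕ) : digitStrVal ('1' :: List.replicate k '0') = 10 ^ k := by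
  have e0 : Nat.digitChar 1 = '1' := by decide
  have e1 : Nat.digitChar 0 = '0' := by decide
  have h1 : ('1' :: List.replicate k '0') = (1 :: List.replicate k 0).map Nat.digitChar := by
    simp [List.map_replicate, e0, e1]
  have hz : Nat.ofDigits 10 (List.replicate k 0) = 0 := by
    induction k with
    | zero => rfl
    | succ k ih => simp [List.replicate_succ, Nat.ofDigits_cons, ih]
  rw [h1, digitStrVal_digits _ (by intro d hd; simp at hd; rcases hd with h | ⟨_, h⟩ <;> omega)]
  rw [List.reverse_cons, Nat.ofDigits_append, List.reverse_replicate, hz]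
  simp [Nat.ofDigits_singleton]

lemma digits_div_pow (m i : ℕ) : Nat.digits 10 (m / 10 ^ i) = (Nat.digits 10 m).drop i := by
  induction i with
  | zero => simp
  | succ i ih =>
    have h1 : m / 10 ^ (i + 1) = m / 10 ^ i / 10 := by
      rw [Nat.div_div_eq_div_mul, ← pow_succ]
    have hdrop : (Nat.digits 10 m).drop (i + 1) = ((Nat.digits 10 m).drop i).tail := by
      rw [List.tail_drop]
    rw [h1, hdrop, ← ih]
    rcases Nat.eq_zero_or_pos (m / 10 ^ i) with h0 | h0
    · simp [h0]
    · rw [Nat.digits_def' (by norm_num : (1:ℕ) < 10) h0, List.tail_cons]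


lemma pref_sum (m j : ℕ) (hj : j ≤ (Nat.digits 10 m).length) :
    (((Nat.digits 10 m).reverse.take j).sum) = sN (m / 10 ^ ((Nat.digits 10 m).length - j)) := by
  rw [List.take_reverse, List.sum_reverse, ← digits_div_pow, digitsSum_eq]

-- ---- loopA characterization ----
lemma loopA_split (t : ℤ) : ∀ (D : List ℤ) (it p : ℤ), ∃ j : ℕ, j ≤ D.length ∧
    loopA t D it p = (it + (D.take j).sum, p + j) ∧
    (∀ i < j, it + (D.take (i + 1)).sum < t) ∧
    (j = D.length ∨ t ≤ it + (D.take (j + 1)).sum) := by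
  intro D
  induction D with
  | nil =>
    intro it p
    exact ⟨0, by simp [loopA]⟩
  | cons d ds ih =>
    intro it p
    by_cases hbr : t ≤ it + d
    · refine ⟨0, by simp, ?_, ?_, ?_⟩
      · simp [loopA, hbr]
      · intro i hi; omega
      · right; simpa using hbr
    · obtain ⟨j, hj, heq, hchk, hlast⟩ := ih (it + d) (p + 1)
      refine ⟨j + 1, by simpa using hj, ?_, ?_, ?_⟩
      · rw [loopA, if_neg hbr, heq]
        simp only [List.take_succ_cons, List.sum_cons, Prod.mk.injEq]
        constructor
        · ring
        · push_cast; ring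
      · intro i hi
        match i with
        | 0 => simpa using hbr
        | i + 1 =>
          have := hchk i (by omega)
          simp only [List.take_succ_cons, List.sum_cons]
          omega
      · rcases hlast with h | h
        · left; simp [h]
        · right
          simp only [List.take_succ_cons, List.sum_cons]
          omega

-- ---- B-side reductions ----
lemma fdiv_natCast (a b : ℕ) : PySem.Int.floordiv (a : ℤ) (b : ℤ) = ((a / b : ℕ) : ℤ) := by
  simp only [PySem.Int.floordiv]
  exact (Int.ofNat_fdiv a b).symm

lemma fmod_natCast (a b : ℕ) : PySem.Int.mod (a : ℤ) (b : ℤ) = ((a % b : ℕ) : ℤ) := by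
  simp only [PySem.Int.mod]
  exact (Int.ofNat_fmod a b).symm

lemma digitSumB_eq (m : ℕ) : ∀ s : ℤ, digitSumB (m : ℤ) s = s + (sN m : ℤ) := by
  induction m using Nat.strong_induction_on with
  | _ m ih =>
    intro s
    rw [digitSumB]
    rcases Nat.eq_zero_or_pos m with h0 | h0
    · subst h0; simp [sN_zero]
    · rw [dif_pos (by exact_mod_cast h0)]
      rw [show (10 : ℤ) = ((10 : ℕ) : ℤ) from rfl, fdiv_natCast, fmod_natCast,
        ih (m / 10) (Nat.div_lt_self h0 (by norm_num)) _, sN_eq m]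
      push_cast
      ring

def candN (m k : ℕ) : ℕ := ((m + 10 ^ k - 1) / 10 ^ k) * 10 ^ k

lemma candN_zero (m : ℕ) : candN m 0 = m := by simp [candN]
lemma le_candN (m k : ℕ) : m ≤ candN m k := by
  unfold candN
  have hp : 0 < 10 ^ k := by positivity
  have h1 := Nat.div_add_mod (m + 10 ^ k - 1) (10 ^ k)
  have h2 : (m + 10 ^ k - 1) % 10 ^ k < 10 ^ k := Nat.mod_lt _ hp
  set q := (m + 10 ^ k - 1) / 10 ^ k
  have e : 10 ^ k * q = q * 10 ^ k := by ring
  omega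
lemma candN_dvd (m k : ℕ) : 10 ^ k ∣ candN m k := Dvd.intro_left _ rfl
lemma candN_eq (m k : ℕ) (hm : 0 < m) :
    candN m k = if 10 ^ k ∣ m then m else (m / 10 ^ k + 1) * 10 ^ k := by
  unfold candN
  have hp : 0 < 10 ^ k := by positivity
  by_cases hdvd : 10 ^ k ∣ m
  · rw [if_pos hdvd]
    obtain ⟨q, rfl⟩ := hdvd
    have hq1 : 1 ≤ q := by
      rcases Nat.eq_zero_or_pos q with h | h
      · subst h; simp at hm
      · exact h
    have e : 10 ^ k * q + 10 ^ k - 1 = 10 ^ k * q + (10 ^ k - 1) := by omega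
    rw [e, Nat.mul_add_div hp, Nat.div_eq_of_lt (by omega)]
    have : (q + 0) * 10 ^ k = 10 ^ k * q := by ring
    omega
  · rw [if_neg hdvd]
    have hr0 : m % 10 ^ k ≠ 0 := fun h => hdvd (Nat.dvd_of_mod_eq_zero h)
    have hdm := Nat.div_add_mod m (10 ^ k)
    have hrlt : m % 10 ^ k < 10 ^ k := Nat.mod_lt _ hp
    have e2 : 10 ^ k * (m / 10 ^ k + 1) = 10 ^ k * (m / 10 ^ k) + 10 ^ k := by ring
    have hr1 : 1 ≤ m % 10 ^ k := by omega
    have e : m + 10 ^ k - 1 = 10 ^ k * (m / 10 ^ k + 1) + (m % 10 ^ k - 1) := by rw [e2]; omega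
    have hlt2 : m % 10 ^ k - 1 < 10 ^ k := by omega
    rw [e, Nat.mul_add_div hp, Nat.div_eq_of_lt hlt2]

lemma candN_le_of (m k : ℕ) (x : ℕ) (hd : 10 ^ k ∣ x) (hx : m ≤ x) : candN m k ≤ x := by
  unfold candN
  have hp : 0 < 10 ^ k := by positivity
  obtain ⟨c, rfl⟩ := hd
  have h1 : (m + 10 ^ k - 1) / 10 ^ k ≤ c := by
    rw [Nat.div_le_iff_le_mul_add_pred hp]
    have : 10 ^ k * c = c * 10 ^ k := by ring
    omega
  calc (m + 10 ^ k - 1) / 10 ^ k * 10 ^ k ≤ c * 10 ^ k := Nat.mul_le_mul_right _ h1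
    _ = 10 ^ k * c := by ring
lemma candN_mono (m : ℕ) {k k' : ℕ} (h : k ≤ k') : candN m k ≤ candN m k' :=
  candN_le_of m k _ (dvd_trans (pow_dvd_pow 10 h) (candN_dvd m k')) (le_candN m k')

lemma loopB_eq (n t p : ℤ) (hp : 0 < p) :
    loopB n t p hp =
      if t < digitSumB (PySem.Int.floordiv (n + p - 1) p * p) 0 ∧ p ≤ n then
        loopB n t (p * 10) (by positivity)
      else PySem.Int.floordiv (n + p - 1) p * p - n := by
  rw [loopB]

lemma loopB_congr (n t p p' : ℤ) (hp : 0 < p) (hp' : 0 < p') (h : p = p') :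
    loopB n t p hp = loopB n t p' hp' := by subst h; rfl

lemma loopB_cand (m : ℕ) (k : ℕ) (t : ℤ) :
    loopB (m : ℤ) t ((10 : ℤ) ^ k) (by positivity) =
      if t < (sN (candN m k) : ℤ) ∧ (10 : ℤ) ^ k ≤ (m : ℤ) then
        loopB (m : ℤ) t ((10 : ℤ) ^ (k + 1)) (by positivity)
      else (candN m k : ℤ) - (m : ℤ) := by
  have hone : (1:ℕ) ≤ 10 ^ k := Nat.one_le_pow _ _ (by norm_num)
  have e1 : (m:ℤ) + 10 ^ k - 1 = ((m + 10 ^ k - 1 : ℕ) : ℤ) := by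
    rw [Nat.cast_sub (by omega)]
    push_cast
    ring
  have e2 : PySem.Int.floordiv ((m:ℤ) + 10 ^ k - 1) (10 ^ k) * 10 ^ k = ((candN m k : ℕ) : ℤ) := by
    rw [e1, show ((10:ℤ) ^ k) = ((10 ^ k : ℕ) : ℤ) from by push_cast; ring, fdiv_natCast]
    rw [← Nat.cast_mul]
    rfl
  rw [loopB_eq, e2, digitSumB_eq, zero_add]
  by_cases hc : t < (sN (candN m k) : ℤ) ∧ (10 : ℤ) ^ k ≤ (m : ℤ)
  · rw [if_pos hc, if_pos hc]
    exact loopB_congr _ _ _ _ _ _ (by ring)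
  · rw [if_neg hc, if_neg hc]

-- the main loop theorem: under the two invariants, loopB lands exactly on W
lemma loopB_main (m : ℕ) (t : ℤ) (hm : 0 < m) (M W : ℕ)
    (hW : W = candN m M) (hMlen : M ≤ (Nat.digits 10 m).length)
    (h1 : ∀ N : ℕ, m ≤ N → N < W → t < (sN N : ℤ))
    (h2 : (sN W : ℤ) ≤ t ∨ (M = (Nat.digits 10 m).length ∧ ∀ k ≤ M, t < (sN (candN m k) : ℤ))) :
    ∀ k, k ≤ M → loopB (m : ℤ) t ((10 : ℤ) ^ k) (by positivity) = (W : ℤ) - (m : ℤ) := by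
  have hlen10 : m < 10 ^ (Nat.digits 10 m).length := Nat.lt_base_pow_length_digits (by norm_num)
  suffices h : ∀ d k, k ≤ M → M - k = d → loopB (m : ℤ) t ((10 : ℤ) ^ k) (by positivity) = (W : ℤ) - (m : ℤ) by
    intro k hk; exact h (M - k) k hk rfl
  intro d
  induction d with
  | zero =>
    intro k hk hd
    have hkM : k = M := by omega
    subst hkM
    have hnc : ¬ (t < (sN (candN m k) : ℤ) ∧ (10:ℤ) ^ k ≤ (m : ℤ)) := by
      rw [← hW]
      rcases h2 with h2 | ⟨h2a, h2b⟩
      · intro ⟨hcl, _⟩; omega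
      · intro ⟨_, hcr⟩
        have hcast : (10:ℤ) ^ k = ((10 ^ k : ℕ) : ℤ) := by push_cast; ring
        rw [hcast, Nat.cast_le] at hcr
        rw [h2a] at hcr
        omega
    rw [loopB_cand, if_neg hnc, hW]
  | succ d ih =>
    intro k hk hd
    rw [loopB_cand]
    by_cases hc : t < (sN (candN m k) : ℤ) ∧ (10 : ℤ) ^ k ≤ (m : ℤ)
    · rw [if_pos hc]
      have hkM : k < M := by
        rcases eq_or_lt_of_le hk with h | h
        · exfalso
          subst h
          rcases h2 with h2 | ⟨h2a, h2b⟩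
          · rw [hW] at h2; omega
          · have hcast : (10:ℤ) ^ k = ((10 ^ k : ℕ) : ℤ) := by push_cast; ring
            rw [hcast, Nat.cast_le] at hc
            rw [h2a] at hc
            omega
        · exact h
      exact ih (k + 1) (by omega) (by omega)
    · rw [if_neg hc]
      rw [not_and_or] at hc
      rcases hc with hc | hc
      · push_neg at hc
        have hge : W ≤ candN m k := by
          by_contra hlt
          push_neg at hlt
          exact absurd hc (not_le.mpr (h1 (candN m k) (le_candN m k) hlt))
        have hle : candN m k ≤ W := by rw [hW]; exact candN_mono m hk
        have : candN m k = W := by omega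
        rw [this]
      · push_neg at hc
        have hcast : (10:ℤ) ^ k = ((10 ^ k : ℕ) : ℤ) := by push_cast; ring
        rw [hcast, Nat.cast_lt] at hc
        have hklen : (Nat.digits 10 m).length ≤ k := by
          rw [Nat.digits_length_le_iff (by norm_num)]
          exact hc
        have hkM : k = M := by omega
        subst hkM
        rw [hW]

-- the central arithmetic equivalence for positive n
lemma pyGet0 (x : ℤ) (xs : List ℤ) : (PySem.List.pyGet? (x :: xs) 0).getD 0 = x := by
  simp [PySem.List.pyGet?, PySem.List.pyIdx?]

lemma flatMap_digit (l : List ℕ) (hl : ∀ d ∈ l, d < 10) :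
    (l.map (fun d : ℕ => (d : ℤ))).flatMap (fun d => (PySem.Int.toStr d).toList) =
      l.map Nat.digitChar := by
  induction l with
  | nil => rfl
  | cons d l ih =>
    rw [List.map_cons, List.map_cons, List.flatMap_cons, PySem.Int.toList_toStr,
      toChars_digit d (hl d (by simp)), ih (fun x hx => hl x (by simp [hx]))]
    rfl

lemma castMapSum (l : List ℕ) : (l.map (fun d : ℕ => (d : ℤ))).sum = (l.sum : ℤ) := by
  induction l with
  | nil => rfl
  | cons d l ih =>
    rw [List.map_cons, List.sum_cons, ih, List.sum_cons]
    push_cast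
    ring

lemma A_unfold (n t : ℤ) (D : List ℤ)
    (h : List.mapM pyIntOfChar (PySem.Int.toStr n).toList = some D) :
    makeIntegerBeautiful n t =
      (if D.sum ≤ t then 0
       else if t ≤ (PySem.List.pyGet? D 0).getD 0 then
         digitStrVal ('1' :: List.replicate D.length '0') - n
       else
         let r := loopA t D 0 0
         let place := r.2
         let band := digitStrVal ('1' :: List.replicate (((D.length : Int) - place).toNat) '0')
         let ded := digitStrVal ((PySem.List.slice D (some place)).flatMap
                      (fun d => (PySem.Int.toStr d).toList))
         band - ded) := by
  unfold makeIntegerBeautiful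
  rw [h]

lemma alt_zero (t : ℤ) : makeIntegerBeautiful_alt 0 t = 0 := by
  unfold makeIntegerBeautiful_alt
  rw [if_neg (by omega : ¬ ((0:ℤ) < 0))]
  rw [show ((0:ℤ)) = ((0:ℕ):ℤ) from rfl,
    loopB_congr ((0:ℕ):ℤ) t 1 ((10:ℤ) ^ 0) (by norm_num) (by positivity) ((pow_zero (10:ℤ)).symm),
    loopB_cand 0 0 t, if_neg (by rintro ⟨-, hc⟩; norm_num at hc), candN_zero]
  norm_num

lemma A_zero_neg (t : ℤ) (ht : t < 0) : makeIntegerBeautiful 0 t = 10 := by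
  have hdig : List.mapM pyIntOfChar (PySem.Int.toStr 0).toList = some [(0 : ℤ)] := by decide
  rw [A_unfold 0 t [(0 : ℤ)] hdig, if_neg (by simp; omega), if_pos (by rw [pyGet0]; omega)]
  decide

lemma main_pos (m : ℕ) (t : ℤ) (hm : 0 < m) :
    makeIntegerBeautiful (m : ℤ) t = makeIntegerBeautiful_alt (m : ℤ) t := by
  have hL10 : ∀ d ∈ Nat.digits 10 m, d < 10 := fun d hd => Nat.digits_lt_base (by norm_num) hd
  have hLne : Nat.digits 10 m ≠ [] := Nat.digits_ne_nil_iff_ne_zero.mpr (by omega)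
  set L := Nat.digits 10 m with hL
  set len := L.length with hlen
  have hlen1 : 1 ≤ len := by
    rcases L with _ | ⟨a, l⟩
    · simp at hLne
    · simp [hlen]
  have hm10 : m < 10 ^ len := Nat.lt_base_pow_length_digits (by norm_num)
  have hmlow : 10 ^ (len - 1) ≤ m := by
    by_contra h
    push Not at h
    have hc := (Nat.digits_length_le_iff (by norm_num) m).mpr h
    rw [← hL, ← hlen] at hc
    omega
  have hrev10 : ∀ d ∈ L.reverse, d < 10 := by simpa using hL10
  have hdig : List.mapM pyIntOfChar (PySem.Int.toStr (m : ℤ)).toList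
      = some (L.reverse.map (fun d : ℕ => (d : ℤ))) := by
    rw [PySem.Int.toList_toStr, toChars_pos m hm, ← List.map_reverse, mapM_digits _ hrev10]
  set D := L.reverse.map (fun d : ℕ => (d : ℤ)) with hD
  have hDsum : D.sum = ((sN m : ℕ) : ℤ) := by
    rw [hD, castMapSum, List.sum_reverse, hL, digitsSum_eq]
  have hDlen : D.length = len := by simp [hD, hlen]
  have hpre : ∀ i ≤ len, (D.take i).sum = ((sN (m / 10 ^ (len - i)) : ℕ) : ℤ) := by
    intro i hi
    have hps := pref_sum m i (by rw [← hL, ← hlen]; exact hi)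
    rw [← hL, ← hlen] at hps
    rw [hD, ← List.map_take, castMapSum, hps]
  obtain ⟨d0, rest, hcons⟩ := List.exists_cons_of_ne_nil (by simpa using hLne : L.reverse ≠ [])
  have hd0L : d0 ∈ L.reverse := by rw [hcons]; simp
  have hd0lt : d0 < 10 := hrev10 d0 hd0L
  have hDcons : D = (d0 : ℤ) :: rest.map (fun d : ℕ => (d : ℤ)) := by rw [hD, hcons]; simp
  have hd0q : (d0 : ℕ) = sN (m / 10 ^ (len - 1)) := by
    have h1 := hpre 1 hlen1
    rw [hDcons] at h1
    simp at h1
    exact_mod_cast h1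
  rw [A_unfold ((m : ℤ)) t D hdig]
  unfold makeIntegerBeautiful_alt
  rw [if_neg (by omega : ¬ ((m : ℤ) < 0))]
  by_cases hsum : D.sum ≤ t
  · rw [if_pos hsum]
    rw [loopB_congr ((m:ℤ)) t 1 ((10:ℤ) ^ 0) (by norm_num) (by positivity) ((pow_zero (10:ℤ)).symm),
      loopB_cand m 0 t,
      if_neg (by rw [hDsum] at hsum; rintro ⟨hc, -⟩; rw [candN_zero] at hc; omega),
      candN_zero]
    omega
  · rw [if_neg hsum]
    push Not at hsum
    have htlt : t < ((sN m : ℕ) : ℤ) := by rwa [hDsum] at hsum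
    by_cases hd0 : t ≤ (PySem.List.pyGet? D 0).getD 0
    · rw [if_pos hd0]
      rw [hDcons, pyGet0] at hd0
      have hWeq : candN m len = 10 ^ len := by
        rw [candN_eq m len hm,
          if_neg (fun hdvd => absurd (Nat.le_of_dvd hm hdvd) (by omega)),
          Nat.div_eq_of_lt hm10]
        omega
      have hjhyp : ∀ j' < len, t ≤ ((sN (m / 10 ^ j') : ℕ) : ℤ) := by
        intro j' hj'
        have ha := sN_div_anti (j := j') (k := len - 1) m (by omega)
        have h2 : t ≤ ((sN (m / 10 ^ (len - 1)) : ℕ) : ℤ) := by rw [← hd0q]; exact_mod_cast hd0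
        have hcast : ((sN (m / 10 ^ (len - 1)) : ℕ) : ℤ) ≤ ((sN (m / 10 ^ j') : ℕ) : ℤ) := by
          exact_mod_cast ha
        omega
      have h1 : ∀ N : ℕ, m ≤ N → N < candN m len → t < (sN N : ℤ) := by
        intro N hNm hNW
        refine sN_min t m htlt len hjhyp N hNm ?_
        rw [Nat.div_eq_of_lt hm10]
        rw [hWeq] at hNW
        omega
      have h2 : ((sN (candN m len) : ℕ) : ℤ) ≤ t ∨ (len = len ∧ ∀ k ≤ len, t < (sN (candN m k) : ℤ)) := by
        by_cases ht1 : 1 ≤ t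
        · left
          rw [hWeq, show (10:ℕ) ^ len = 1 * 10 ^ len from (one_mul _).symm, sN_mul_pow,
            sN_digit (by norm_num)]
          exact_mod_cast ht1
        · right
          refine ⟨rfl, fun k hk => ?_⟩
          have : 0 < sN (candN m k) := sN_pos (lt_of_lt_of_le hm (le_candN m k))
          omega
      have hB := loopB_main m t hm len (candN m len) rfl (by rw [← hL, ← hlen]) h1
        (by rw [← hL, ← hlen]; exact h2) 0 (by omega)
      rw [loopB_congr ((m:ℤ)) t 1 ((10:ℤ) ^ 0) (by norm_num) (by positivity) ((pow_zero (10:ℤ)).symm),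
        hB, hDlen, digitStrVal_band, hWeq]
      push_cast
      ring
    · rw [if_neg hd0]
      rw [hDcons, pyGet0] at hd0
      push Not at hd0
      obtain ⟨j, hjle, heq, hchk, hlast⟩ := loopA_split t D 0 0
      rw [hDlen] at hjle
      have hjlen : j < len := by
        rcases eq_or_lt_of_le hjle with h | h
        · exfalso
          have := hchk (len - 1) (by omega)
          rw [show len - 1 + 1 = len from by omega, ← hDlen, List.take_length, hDsum] at this
          omega
        · exact h
      have hj1 : 1 ≤ j := by
        by_contra h
        have hj0 : j = 0 := by omega
        subst hj0
        rcases hlast with h' | h'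
        · rw [hDlen] at h'; omega
        · rw [hDcons] at h'
          simp at h'
          omega
      set M := len - j with hM
      have hM1 : 1 ≤ M := by omega
      have hMlen : M ≤ len - 1 := by omega
      have hqlt : ((sN (m / 10 ^ M) : ℕ) : ℤ) < t := by
        have := hchk (j - 1) (by omega)
        rw [show j - 1 + 1 = j from by omega, hpre j (by omega), zero_add] at this
        rwa [hM]
      have hq1ge : t ≤ ((sN (m / 10 ^ (M - 1)) : ℕ) : ℤ) := by
        rcases hlast with h' | h'
        · rw [hDlen] at h'; omega
        · rw [hpre (j + 1) (by omega), zero_add, show len - (j + 1) = M - 1 from by omega] at h'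
          exact h'
      have hsplitm : sN m = sN (m % 10 ^ M) + sN (m / 10 ^ M) := by
        conv_lhs => rw [← Nat.mod_add_div m (10 ^ M)]
        exact sN_split M _ _ (Nat.mod_lt _ (by positivity))
      have hmod : m % 10 ^ M ≠ 0 := by
        intro h
        rw [h, sN_zero, zero_add] at hsplitm
        rw [← hsplitm] at hqlt
        omega
      have hWeq : candN m M = (m / 10 ^ M + 1) * 10 ^ M := by
        rw [candN_eq m M hm, if_neg]
        intro hdvd
        exact hmod (Nat.dvd_iff_mod_eq_zero.mp hdvd)
      have hjhyp : ∀ j' < M, t ≤ ((sN (m / 10 ^ j') : ℕ) : ℤ) := by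
        intro j' hj'
        have ha := sN_div_anti (j := j') (k := M - 1) m (by omega)
        have hcast : ((sN (m / 10 ^ (M - 1)) : ℕ) : ℤ) ≤ ((sN (m / 10 ^ j') : ℕ) : ℤ) := by
          exact_mod_cast ha
        omega
      have h1 : ∀ N : ℕ, m ≤ N → N < candN m M → t < (sN N : ℤ) := by
        intro N hNm hNW
        refine sN_min t m htlt M hjhyp N hNm ?_
        rw [← hWeq]
        exact hNW
      have h2 : ((sN (candN m M) : ℕ) : ℤ) ≤ t ∨ (M = len ∧ ∀ k ≤ M, t < (sN (candN m k) : ℤ)) := by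
        left
        rw [hWeq, sN_mul_pow]
        have hsle := sN_succ_le (m / 10 ^ M)
        have hc2 : ((sN (m / 10 ^ M + 1) : ℕ) : ℤ) ≤ ((sN (m / 10 ^ M) : ℕ) : ℤ) + 1 := by
          exact_mod_cast hsle
        omega
      have hB := loopB_main m t hm M (candN m M) rfl (by rw [← hL, ← hlen]; omega) h1
        (by rw [← hL, ← hlen]; exact h2) 0 (by omega)
      rw [loopB_congr ((m:ℤ)) t 1 ((10:ℤ) ^ 0) (by norm_num) (by positivity) ((pow_zero (10:ℤ)).symm),
        hB]
      rw [heq]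
      simp only [zero_add]
      have hplace : (((D.length : ℤ)) - (j : ℕ)).toNat = M := by
        rw [hDlen]; omega
      have hslice : PySem.List.slice D (some ((j : ℕ) : ℤ)) = D.drop j := by
        rw [PySem.List.slice_from D (by positivity)]
        congr 1
      have hdrop : D.drop j = (L.reverse.drop j).map (fun d : ℕ => (d : ℤ)) := by
        rw [hD, List.map_drop]
      have hdropchars : (L.reverse.drop j) = (L.take M).reverse := by
        rw [List.drop_reverse, ← hlen, hM]
      have hded : digitStrVal ((PySem.List.slice D (some ((j : ℕ) : ℤ))).flatMap
          (fun d => (PySem.Int.toStr d).toList)) = ((m % 10 ^ M : ℕ) : ℤ) := by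
        rw [hslice, hdrop, flatMap_digit _ (fun d hd => hrev10 d (List.mem_of_mem_drop hd)),
          digitStrVal_digits _ (fun d hd => hrev10 d (List.mem_of_mem_drop (by
            rw [hdropchars] at hd ⊢; exact hd))), hdropchars, List.reverse_reverse,
          Nat.self_mod_pow_eq_ofDigits_take M m (by norm_num)]
      rw [hplace, hded, digitStrVal_band, hWeq]
      have hdm := Nat.div_add_mod' m (10 ^ M)
      have e1 : (((m / 10 ^ M + 1) * 10 ^ M : ℕ) : ℤ)
          = ((m / 10 ^ M * 10 ^ M : ℕ) : ℤ) + ((10 ^ M : ℕ) : ℤ) := by push_cast; ring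
      have e2 : ((m : ℕ) : ℤ) = ((m / 10 ^ M * 10 ^ M : ℕ) : ℤ) + ((m % 10 ^ M : ℕ) : ℤ) := by
        exact_mod_cast congrArg (fun x : ℕ => (x : ℤ)) hdm.symm
      have e3 : ((10 ^ M : ℕ) : ℤ) = (10 : ℤ) ^ M := by push_cast; ring
      omega

lemma main_zero (t : ℤ) (ht : 0 ≤ t) :
    makeIntegerBeautiful 0 t = makeIntegerBeautiful_alt 0 t := by
  have hdig : List.mapM pyIntOfChar (PySem.Int.toStr 0).toList = some [(0 : ℤ)] := by decide
  rw [A_unfold 0 t [(0 : ℤ)] hdig, if_pos (by simp; omega), alt_zero]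

-- ===== VERDICT (by name: the statement is the Claim_ definition above) =====
theorem makeIntegerBeautiful_spec : Claim_unchanged_makeIntegerBeautiful := by
  intro n target _ hpre hD
  unfold Pre_makeIntegerBeautiful at hpre
  unfold D_makeIntegerBeautiful at hD
  rcases (by omega : n = 0 ∨ 0 < n) with h0 | hpos
  · subst h0
    exact main_zero target (by omega)
  · have : n = ((n.toNat : ℕ) : ℤ) := by omega
    rw [this]
    exact main_pos n.toNat target (by omega)

theorem makeIntegerBeautiful_changed : Claim_changed_makeIntegerBeautiful := by
  unfold Claim_changed_makeIntegerBeautiful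
  refine ⟨by decide, by decide, by decide, by decide, ?_, by decide⟩
  exact alt_zero (-1)

theorem makeIntegerBeautiful_tight : Claim_exact_makeIntegerBeautiful := by
  unfold Claim_exact_makeIntegerBeautiful
  intro n t _ _ hD
  obtain ⟨h0, ht⟩ := hD
  subst h0
  rw [alt_zero t, A_zero_neg t ht]
  norm_num
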